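-- pv_equiv track=rewrite | github.com/stampedsteve/RSASeniorProject | RSA Senior Project.py | tricode
-- ===== SOURCE A (Python) =====
-- def subDivider(message, num, length):
--   msg = message[:length]
--   sub = []
--   result = []
--   count = 0
--   for n in msg:
--       sub.append(n)
--       count += 1
--       if count%num == 0:
--          result.append(sub)
--          sub = []
--   return result
--
-- def tricode(message):
--   trigraphs = subDivider(message, 3, len(message))
--   crypt = []
--   for graphs in trigraphs:
--     count = 2
--     code = 0
--     for char in graphs:
--       num = (ord(char) - 97) * 26**count
--       count -= 1
--       code += num
--     crypt.append(code)
--   return crypt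
-- ===== SOURCE B (Python) =====
-- def tricode(message):
--   n = len(message) // 3
--   crypt = []
--   for i in range(n):
--     crypt.append((ord(message[3*i]) - 97) * 676
--                  + (ord(message[3*i + 1]) - 97) * 26
--                  + (ord(message[3*i + 2]) - 97))
--   return crypt
-- ===== Notes on version B (the rewrite author's own statement) =====
-- stated objective: simpler
-- what changed: Replaces A's build-groups-then-reduce pipeline (subDivider accumulating a list of 3-char sublists, then a nested fold with a running exponent counter) by one indexed pass over range(len//3) that appends the closed-form base-26 value of each trigraph directly.
import Mathlib
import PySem

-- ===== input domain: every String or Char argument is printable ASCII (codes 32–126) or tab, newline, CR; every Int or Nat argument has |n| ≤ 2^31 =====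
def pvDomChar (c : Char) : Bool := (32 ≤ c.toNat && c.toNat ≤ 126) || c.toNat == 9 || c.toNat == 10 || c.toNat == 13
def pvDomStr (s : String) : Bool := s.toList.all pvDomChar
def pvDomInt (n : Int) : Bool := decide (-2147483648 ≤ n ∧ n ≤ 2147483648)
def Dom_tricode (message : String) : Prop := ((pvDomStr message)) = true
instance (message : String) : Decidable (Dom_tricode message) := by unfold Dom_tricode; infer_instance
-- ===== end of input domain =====

-- B replaces A's build-groups-then-reduce pipeline by one indexed pass with a closed-form value per trigraph (objective: simpler).

-- ===== PORT A =====
-- subDivider's loop body (sub.append(n); count += 1; if count%num==0: result.append(sub); sub=[])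
-- state st = (sub, result, count); 'sub ++ [n]' and 'count + 1' are written inline
def pvStepA (num : Int) (st : List Char × List (List Char) × Int) (n : Char) :
    List Char × List (List Char) × Int :=
  if PySem.Int.mod (st.2.2 + 1) num = 0 then ([], st.2.1 ++ [st.1 ++ [n]], st.2.2 + 1)
  else (st.1 ++ [n], st.2.1, st.2.2 + 1)

def tricode_subDivider (message : List Char) (num : Int) (length : Int) : List (List Char) :=
  let msg := PySem.List.slice message none (some length)
  (msg.foldl (pvStepA num) ([], [], 0)).2.1

def tricode (message : String) : List Int :=
  let trigraphs := tricode_subDivider message.toList 3 (message.toList.length : Int)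
  trigraphs.foldl
    (fun crypt graphs =>
      -- inner loop state (count, code); exponent 26**count taken via .toNat (count is 2,1,0 here)
      let r := graphs.foldl
        (fun (p : Int × Int) char =>
          (p.1 - 1, p.2 + ((char.toNat : Int) - 97) * 26 ^ p.1.toNat))
        (2, 0)
      crypt ++ [r.2])
    []

-- ===== PORT B =====
def tricode_alt (message : String) : List Int :=
  let l := message.toList
  let n := PySem.Int.floordiv (l.length : Int) 3
  -- message[3*i+j] is always in range for i < n, so the pyGetD default is never used
  (PySem.List.pyRange 0 n 1).foldl
    (fun crypt i =>
      crypt ++ [((PySem.List.pyGetD l (3 * i) ' ').toNat - 97 : Int) * 676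
        + ((PySem.List.pyGetD l (3 * i + 1) ' ').toNat - 97 : Int) * 26
        + ((PySem.List.pyGetD l (3 * i + 2) ' ').toNat - 97 : Int)])
    []

-- ===== PRECONDITION & SPEC =====
def Spec_tricode (message : String) (out : List Int) : Prop := out = tricode_alt message
instance (message : String) (out : List Int) : Decidable (Spec_tricode message out) := by unfold Spec_tricode; infer_instance

-- ===== CLAIM (what is proved, stated in full; the proofs are below) =====
def Claim_equal_tricode : Prop := ∀ (message : String), Dom_tricode message → Spec_tricode message (tricode message)

-- ===== LEMMAS AND PROOFS =====

-- canonical form both sides are reduced to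
def pvChunks : List Char → List (List Char)
  | a :: b :: c :: rest => [a, b, c] :: pvChunks rest
  | _ => []

def pvEnc (g : List Char) : Int :=
  match g with
  | [a, b, c] => ((a.toNat : Int) - 97) * 676 + ((b.toNat : Int) - 97) * 26 + ((c.toNat : Int) - 97)
  | _ => 0

lemma subDivider_loop (l : List Char) : ∀ (res : List (List Char)) (c : Int), 3 ∣ c →
    (l.foldl (pvStepA 3) ([], res, c)).2.1 = res ++ pvChunks l := by
  induction l using pvChunks.induct with
  | case1 a b c rest ih =>
    intro res cnt hc
    obtain ⟨m, rfl⟩ := hc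
    have s1 : pvStepA 3 ([], res, 3 * m) a = ([a], res, 3 * m + 1) := by
      simp [pvStepA]
    have s2 : pvStepA 3 ([a], res, 3 * m + 1) b = ([a, b], res, 3 * m + 2) := by
      simp [pvStepA, show ¬(3 : Int) ∣ 3 * m + 1 + 1 by omega]
      omega
    have s3 : pvStepA 3 ([a, b], res, 3 * m + 2) c = ([], res ++ [[a, b, c]], 3 * m + 3) := by
      simp [pvStepA, show (3 : Int) ∣ 3 * m + 2 + 1 by omega]
      omega
    rw [List.foldl_cons, List.foldl_cons, List.foldl_cons, s1, s2, s3,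
      ih (res ++ [[a, b, c]]) (3 * m + 3) ⟨m + 1, by ring⟩]
    simp [pvChunks]
  | case2 t h =>
    intro res cnt hc
    obtain ⟨m, rfl⟩ := hc
    match t, h with
    | [], _ => simp [pvChunks]
    | [a], _ =>
      have s1 : pvStepA 3 ([], res, 3 * m) a = ([a], res, 3 * m + 1) := by
        simp [pvStepA]
      rw [List.foldl_cons, List.foldl_nil, s1]
      simp [pvChunks]
    | [a, b], _ =>
      have s1 : pvStepA 3 ([], res, 3 * m) a = ([a], res, 3 * m + 1) := by
        simp [pvStepA]
      have s2 : pvStepA 3 ([a], res, 3 * m + 1) b = ([a, b], res, 3 * m + 2) := by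
        simp [pvStepA, show ¬(3 : Int) ∣ 3 * m + 1 + 1 by omega]
        omega
      rw [List.foldl_cons, List.foldl_cons, List.foldl_nil, s1, s2]
      simp [pvChunks]
    | a :: b :: c :: r, h => exact (h a b c r rfl).elim

lemma subDivider_eq_chunks (l : List Char) :
    tricode_subDivider l 3 (l.length : Int) = pvChunks l := by
  have := subDivider_loop l [] 0 ⟨0, rfl⟩
  simpa [tricode_subDivider, PySem.List.slice_to (xs := l) (b := (l.length : Int)) (by positivity)]
    using this

lemma inner_fold_enc (a b c : Char) :
    (([a, b, c] : List Char).foldl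
      (fun (p : Int × Int) char =>
        (p.1 - 1, p.2 + ((char.toNat : Int) - 97) * 26 ^ p.1.toNat))
      (2, 0)).2 = pvEnc [a, b, c] := by
  have h2 : ((2 : Int)).toNat = 2 := by decide
  have h1 : ((2 : Int) - 1).toNat = 1 := by decide
  have h0 : ((2 : Int) - 1 - 1).toNat = 0 := by decide
  simp only [List.foldl_cons, List.foldl_nil, pvEnc, h2, h1, h0]
  ring

lemma chunks_mem_shape (l : List Char) (g : List Char) (hg : g ∈ pvChunks l) :
    ∃ a b c, g = [a, b, c] := by
  induction l using pvChunks.induct with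
  | case1 a b c rest ih =>
    simp only [pvChunks, List.mem_cons] at hg
    rcases hg with rfl | hg
    · exact ⟨a, b, c, rfl⟩
    · exact ih hg
  | case2 t h =>
    match t, h with
    | [], _ => simp [pvChunks] at hg
    | [a], _ => simp [pvChunks] at hg
    | [a, b], _ => simp [pvChunks] at hg
    | a :: b :: c :: r, h => exact (h a b c r rfl).elim

lemma tricode_eq_map (message : String) :
    tricode message = (pvChunks message.toList).map pvEnc := by
  unfold tricode
  rw [subDivider_eq_chunks, PySem.List.foldl_append_singleton_eq_map]
  simp only [List.nil_append]
  refine List.map_congr_left fun g hg => ?_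
  obtain ⟨a, b, c, rfl⟩ := chunks_mem_shape _ g hg
  exact inner_fold_enc a b c

lemma alt_eq_map (l : List Char) :
    tricode_alt (String.ofList l) = (pvChunks l).map pvEnc := by
  unfold tricode_alt
  rw [PySem.List.foldl_append_singleton_eq_map]
  simp only [String.toList_ofList, List.nil_append]
  rw [show ((l.length : Int)) = ((l.length : Nat) : Int) from rfl,
    show (3 : Int) = ((3 : Nat) : Int) from rfl, PySem.Int.floordiv_natCast,
    PySem.List.pyRange_zero_natCast, List.map_map]
  induction l using pvChunks.induct with
  | case1 a b c rest ih =>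
    have hlen : (a :: b :: c :: rest).length / 3 = rest.length / 3 + 1 := by
      simp only [List.length_cons]; omega
    rw [hlen, List.range_succ_eq_map]
    simp only [List.map_cons, List.map_map, pvChunks]
    congr 1
    · show _ = pvEnc [a, b, c]
      simp only [Function.comp, Nat.cast_zero, mul_zero, zero_add, pvEnc]
      simp [PySem.List.pyGetD_ofNat']
    · rw [← ih]
      refine List.map_congr_left fun k _ => ?_
      simp only [Function.comp]
      rw [show ((3 : Nat) : Int) * ((Nat.succ k : Nat) : Int) = ((3 * k + 3 : Nat) : Int) by
            push_cast [Nat.succ_eq_add_one]; ring,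
          show ((3 * k + 3 : Nat) : Int) + 1 = ((3 * k + 4 : Nat) : Int) by push_cast; ring,
          show ((3 * k + 3 : Nat) : Int) + 2 = ((3 * k + 5 : Nat) : Int) by push_cast; ring,
          show ((3 : Nat) : Int) * ((k : Nat) : Int) = ((3 * k : Nat) : Int) by push_cast; ring,
          show ((3 * k : Nat) : Int) + 1 = ((3 * k + 1 : Nat) : Int) by push_cast; ring,
          show ((3 * k : Nat) : Int) + 2 = ((3 * k + 2 : Nat) : Int) by push_cast; ring]
      simp only [PySem.List.pyGetD_natCast]
      rw [show 3 * k + 3 = (3 * k) + 1 + 1 + 1 by ring,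
          show 3 * k + 4 = (3 * k + 1) + 1 + 1 + 1 by ring,
          show 3 * k + 5 = (3 * k + 2) + 1 + 1 + 1 by ring]
      simp
  | case2 t h =>
    have h0 : t.length / 3 = 0 := by
      match t, h with
      | [], _ => simp
      | [a], _ => simp
      | [a, b], _ => simp
      | a :: b :: c :: r, h => exact (h a b c r rfl).elim
    have h1 : pvChunks t = [] := by
      match t, h with
      | [], _ => rfl
      | [a], _ => rfl
      | [a, b], _ => rfl
      | a :: b :: c :: r, h => exact (h a b c r rfl).elim
    simp [h0, h1]

-- ===== VERDICT (by name: the statement is the Claim_ definition above) =====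
theorem tricode_spec : Claim_equal_tricode := by
  intro message _
  unfold Spec_tricode
  rw [tricode_eq_map]
  have := alt_eq_map message.toList
  rw [String.ofList_toList] at this
  exact this.symm
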